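-- pv_equiv track=rewrite | github.com/NoahTN/epi-workbook | 13_sorting/13.8_partion__repeated_entry_array.py | partition_repeated_entry_array
-- ===== SOURCE A (Python) =====
-- def partition_repeated_entry_array(arr):
--    pos_dict = {}
--    result = []
--
--    for i in range(len(arr)):
--       pos_dict[arr[i]] = pos_dict.get(arr[i], []) + [i]
--    for k in pos_dict.keys():
--       for p in pos_dict[k]:
--          result.append(arr[p])
--    return result
-- ===== SOURCE B (Python) =====
-- def partition_repeated_entry_array(arr):
--     first = {}
--     for i, x in enumerate(arr):
--         if x not in first:
--             first[x] = i
--     return sorted(arr, key=lambda x: first[x])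
-- ===== Notes on version B (the rewrite author's own statement) =====
-- stated objective: idiomatic
-- what changed: B replaces A's bucket dict (per-value index lists replayed group by group) with one pass recording each value's first-appearance index and a single stable sort of arr keyed on that index; no grouping buckets are built or replayed.
import Mathlib
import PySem

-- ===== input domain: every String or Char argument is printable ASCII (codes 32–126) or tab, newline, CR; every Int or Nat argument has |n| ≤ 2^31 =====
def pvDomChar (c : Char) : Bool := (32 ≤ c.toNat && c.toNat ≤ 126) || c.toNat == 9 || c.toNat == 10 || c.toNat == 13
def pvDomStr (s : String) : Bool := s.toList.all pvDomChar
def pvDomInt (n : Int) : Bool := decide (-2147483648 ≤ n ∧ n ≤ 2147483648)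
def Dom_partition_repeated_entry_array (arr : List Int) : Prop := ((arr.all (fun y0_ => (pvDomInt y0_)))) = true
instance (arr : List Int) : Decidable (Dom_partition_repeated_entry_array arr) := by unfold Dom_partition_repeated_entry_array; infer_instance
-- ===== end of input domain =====

-- B records each value's first-appearance index in one pass and stable-sorts arr on that index, instead of A's bucket dict of index lists replayed group by group; same output, different algorithm.

-- ===== PORT A =====
def partition_repeated_entry_array (arr : List Int) : List Int :=
  let pos_dict : PySem.Dict Int (List Int) :=
    (PySem.List.pyRange 0 (PySem.List.len arr) 1).foldl
      (fun d i => d.insert (PySem.List.pyGetD arr i 0)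
                           (d.getD (PySem.List.pyGetD arr i 0) [] ++ [i]))
      PySem.Dict.empty
  pos_dict.keys.foldl
    (fun result k =>
      (pos_dict.getD k []).foldl (fun r p => r ++ [PySem.List.pyGetD arr p 0]) result)
    []

-- ===== PORT B =====
-- the 'for i, x in enumerate(arr): if x not in first: first[x] = i' loop of Source B
def pvFirstDict (arr : List Int) : PySem.Dict Int Int :=
  (PySem.List.enumerate arr).foldl
    (fun d p => if d.contains p.2 then d else d.insert p.2 p.1) PySem.Dict.empty

-- 'first[x]' never raises in Source B (every element of arr is a key of first), so getD is exact here
def partition_repeated_entry_array_alt (arr : List Int) : List Int :=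
  PySem.List.sorted arr (fun x => (pvFirstDict arr).getD x 0) false

-- ===== PRECONDITION & SPEC =====
def Spec_partition_repeated_entry_array (arr : List Int) (out : List Int) : Prop := out = partition_repeated_entry_array_alt arr
instance (arr : List Int) (out : List Int) : Decidable (Spec_partition_repeated_entry_array arr out) := by unfold Spec_partition_repeated_entry_array; infer_instance

-- ===== CLAIM (what is proved, stated in full; the proofs are below) =====
def Claim_equal_partition_repeated_entry_array : Prop := ∀ (arr : List Int), Dom_partition_repeated_entry_array arr → Spec_partition_repeated_entry_array arr (partition_repeated_entry_array arr)

-- ===== LEMMAS AND PROOFS =====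

-- the common normal form both programs reach: distinct values in first-appearance order, each replicated its count
def pvGroups (arr : List Int) : List Int :=
  (PySem.Set.ofList arr).flatMap (fun k => List.replicate (arr.count k) k)

-- the key Source B sorts on, characterised: the index of the first occurrence
def pvKIdx (arr : List Int) (x : Int) : Int := (arr.idxOf x : Int)

-- ---- A's side (bucket replay) ----

theorem len_aux (arr : List Int) (k : Int) :
    (List.filter (fun p => p.1 == k) (List.map (fun p => (p.2, p.1)) (PySem.List.enumerate arr))).length
      = arr.count k := by
  rw [← List.countP_eq_length_filter, List.countP_map, List.count_eq_countP]
  have : ((fun (p : Int × Int) => p.1 == k) ∘ fun (p : Int × Int) => (p.2, p.1))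
       = ((fun x => x == k) ∘ fun (p : Int × Int) => p.2) := rfl
  rw [this, ← List.countP_map, PySem.List.map_snd_enumerate]

theorem pos_map_eq_replicate (arr : List Int) (k : Int) :
    (List.map (fun p => PySem.List.pyGetD arr p.2 0)
      (List.filter (fun p => p.1 == k)
        (List.map (fun p => (p.2, p.1)) (PySem.List.enumerate arr))))
      = List.replicate (arr.count k) k := by
  rw [List.eq_replicate_iff]
  refine ⟨by rw [List.length_map, len_aux], ?_⟩
  intro b hb
  rw [List.mem_map] at hb
  obtain ⟨p, hp, rfl⟩ := hb
  rw [List.mem_filter] at hp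
  obtain ⟨hpl, hpk⟩ := hp
  rw [List.mem_map] at hpl
  obtain ⟨q, hq, rfl⟩ := hpl
  rw [PySem.List.mem_enumerate_iff] at hq
  obtain ⟨kk, hk, rfl⟩ := hq
  simp only [beq_iff_eq] at hpk
  simp only [zero_add]
  rw [PySem.List.pyGetD_natCast, List.getD_eq_getElem _ _ hk]
  exact hpk

theorem a_eq_groups (arr : List Int) :
    partition_repeated_entry_array arr = pvGroups arr := by
  unfold partition_repeated_entry_array pvGroups
  have hpos :
      (PySem.List.pyRange 0 (PySem.List.len arr) 1).foldl
        (fun d i => d.insert (PySem.List.pyGetD arr i 0)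
                             (d.getD (PySem.List.pyGetD arr i 0) [] ++ [i]))
        (PySem.Dict.empty : PySem.Dict Int (List Int))
      = (List.map (fun p => (p.2, p.1)) (PySem.List.enumerate arr)).foldl
          (fun d p => d.modify p.1 [] (· ++ [p.2])) PySem.Dict.empty := by
    rw [List.foldl_map, PySem.List.enumerate_eq_map_pyRange arr 0, List.foldl_map]
    rfl
  rw [hpos]
  set l2 := List.map (fun p => (p.2, p.1)) (PySem.List.enumerate arr) with hl2
  set pos := l2.foldl (fun d p => d.modify p.1 [] (· ++ [p.2]))
      (PySem.Dict.empty : PySem.Dict Int (List Int)) with hposdef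
  have hkeys : pos.keys = PySem.Set.ofList arr := by
    rw [hposdef, PySem.Dict.keys_foldl_modify_key l2 (fun p => p.1) [] (fun _ p => (· ++ [p.2]))]
    rw [hl2, List.map_map]
    have : ((fun (p : Int × Int) => p.1) ∘ fun (p : Int × Int) => (p.2, p.1))
         = (fun (p : Int × Int) => p.2) := rfl
    rw [this, PySem.List.map_snd_enumerate]
    rfl
  have hgetD : ∀ k, pos.getD k [] = (l2.filter (fun p => p.1 == k)).map (fun p => p.2) := by
    intro k
    rw [hposdef, PySem.Dict.getD_foldl_modify_append l2 PySem.Dict.empty k]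
    simp [PySem.Dict.getD_empty]
  have hstep : ∀ (acc : List Int), ∀ k ∈ pos.keys,
      (pos.getD k []).foldl (fun r p => r ++ [PySem.List.pyGetD arr p 0]) acc
        = acc ++ List.replicate (arr.count k) k := by
    intro acc k _
    rw [PySem.List.foldl_append_singleton_eq_map, hgetD, List.map_map]
    rw [← pos_map_eq_replicate arr k, hl2]
    rfl
  rw [PySem.List.foldl_congr_mem pos.keys _
        (fun acc k => acc ++ List.replicate (arr.count k) k) [] hstep,
      PySem.List.foldl_append_eq_flatMap, hkeys]
  rfl

-- ---- B's side (first-index dict + stable sort) ----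

theorem firstDict_fold_get? (l : List (Int × Int)) (d : PySem.Dict Int Int) (k : Int) :
    (l.foldl (fun d p => if d.contains p.2 then d else d.insert p.2 p.1) d).get? k
      = (d.get? k).or ((l.find? (fun p => p.2 == k)).map (·.1)) := by
  induction l generalizing d with
  | nil => simp
  | cons p l ih =>
    simp only [List.foldl_cons, List.find?_cons]
    by_cases hpk : p.2 = k
    · subst hpk
      by_cases hc : d.contains p.2
      · rw [if_pos hc, ih]
        rw [PySem.Dict.contains_eq_isSome_get?] at hc
        obtain ⟨v, hv⟩ := Option.isSome_iff_exists.mp hc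
        simp [hv]
      · rw [if_neg hc, ih]
        rw [PySem.Dict.contains_eq_isSome_get?] at hc
        have hd : d.get? p.2 = none := Option.not_isSome_iff_eq_none.mp (by simpa using hc)
        simp [PySem.Dict.get?_insert_self, hd]
    · have hne : (p.2 == k) = false := by simp [hpk]
      rw [hne]
      by_cases hc : d.contains p.2
      · rw [if_pos hc, ih]
      · rw [if_neg hc, ih,
            PySem.Dict.get?_insert_of_ne _ _ (show k ≠ p.2 from fun h => hpk h.symm)]

theorem find?_enumerate_eq (arr : List Int) (k : Int) (hk : k ∈ arr) (s : Int) :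
    (PySem.List.enumerate arr s).find? (fun p => p.2 == k)
      = some ((s + (arr.idxOf k : Int), k)) := by
  induction arr generalizing s with
  | nil => cases hk
  | cons x xs ih =>
    rw [PySem.List.enumerate_cons, List.find?_cons]
    by_cases hxk : x = k
    · subst hxk
      simp [List.idxOf_cons_self]
    · have hne : (x == k) = false := by simp [hxk]
      rw [hne]
      have hkxs : k ∈ xs := by
        rcases List.mem_cons.mp hk with h | h
        · exact absurd h.symm hxk
        · exact h
      rw [ih hkxs (s + 1), List.idxOf_cons_ne xs hxk]
      simp only [Option.some.injEq, Prod.mk.injEq]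
      refine ⟨by push_cast; ring, by trivial⟩

theorem firstDict_getD (arr : List Int) (k : Int) (hk : k ∈ arr) :
    (pvFirstDict arr).getD k 0 = pvKIdx arr k := by
  unfold pvFirstDict pvKIdx
  rw [PySem.Dict.getD_eq_get?_getD, firstDict_fold_get? _ _ k,
      PySem.Dict.get?_empty, Option.none_or, find?_enumerate_eq arr k hk 0]
  simp

theorem idxOf_inj_mem (arr : List Int) (a b : Int) (ha : a ∈ arr) (hb : b ∈ arr)
    (h : arr.idxOf a = arr.idxOf b) : a = b := by
  have h1 : arr[arr.idxOf a]'(List.idxOf_lt_length_of_mem ha) = a := List.getElem_idxOf _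
  have h2 : arr[arr.idxOf b]'(List.idxOf_lt_length_of_mem hb) = b := List.getElem_idxOf _
  rw [← h1, ← h2]
  simp_rw [h]

theorem ofList_pairwise_idxOf (arr : List Int) :
    (PySem.Set.ofList arr).Pairwise (fun a b => arr.idxOf a < arr.idxOf b) := by
  induction arr with
  | nil => simp [PySem.Set.ofList_nil]
  | cons x xs ih =>
    rw [PySem.Set.ofList_cons]
    constructor
    · intro b hb
      rw [PySem.Set.mem_discard] at hb
      obtain ⟨hbs, hbx⟩ := hb
      rw [List.idxOf_cons_self, List.idxOf_cons_ne xs (fun h => hbx h.symm)]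
      omega
    · have hsub : List.Sublist ((PySem.Set.ofList xs).discard x) (PySem.Set.ofList xs) := by
        have hd : (PySem.Set.ofList xs).discard x
            = (PySem.Set.ofList xs).filter (fun y => !(y == x)) := by
          simp [PySem.Set.discard]
        rw [hd]
        exact List.filter_sublist
      refine (ih.sublist hsub).imp_of_mem ?_
      intro a b ha hb hab
      have hax : a ≠ x := ((PySem.Set.mem_discard _ _ _).mp ha).2
      have hbx : b ≠ x := ((PySem.Set.mem_discard _ _ _).mp hb).2
      rw [List.idxOf_cons_ne xs (fun h => hax h.symm),
          List.idxOf_cons_ne xs (fun h => hbx h.symm)]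
      omega

theorem sum_count_replicate (x : Int) (c : Int → Nat) (s : List Int) (hnd : s.Nodup) :
    ((s.map (fun k => (List.replicate (c k) k).count x)).sum)
      = if x ∈ s then c x else 0 := by
  induction s with
  | nil => simp
  | cons y ys ih =>
    obtain ⟨hy, hys⟩ := List.nodup_cons.mp hnd
    simp only [List.map_cons, List.sum_cons, ih hys]
    by_cases hxy : x = y
    · subst hxy
      simp [hy, List.mem_cons]
    · have hk : (List.replicate (c y) y).count x = 0 := by
        simp [List.count_replicate, Ne.symm hxy]
      rw [hk]
      simp [List.mem_cons, hxy]

theorem groups_perm (arr : List Int) : (pvGroups arr).Perm arr := by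
  rw [List.perm_iff_count]
  intro x
  unfold pvGroups
  rw [List.count_flatMap]
  have hsum := sum_count_replicate x (fun k => arr.count k) (PySem.Set.ofList arr)
      (PySem.Set.nodup_ofList arr)
  simp only [Function.comp_def] at *
  rw [hsum]
  by_cases hx : x ∈ arr
  · simp [PySem.Set.mem_ofList, hx]
  · simp [PySem.Set.mem_ofList, hx, List.count_eq_zero_of_not_mem hx]

-- the order both results satisfy: strictly increasing first-index, or equal elements
theorem groups_sorted (arr : List Int) :
    (pvGroups arr).Pairwise (fun a b => pvKIdx arr a < pvKIdx arr b ∨ a = b) := by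
  unfold pvGroups
  rw [List.pairwise_flatMap]
  refine ⟨?_, ?_⟩
  · intro k _
    rw [List.pairwise_replicate]
    exact Or.inr (Or.inr rfl)
  · refine (ofList_pairwise_idxOf arr).imp_of_mem ?_
    intro k1 k2 _ _ h a ha b hb
    rw [List.eq_of_mem_replicate ha, List.eq_of_mem_replicate hb]
    left
    unfold pvKIdx
    exact_mod_cast h

theorem alt_sorted (arr : List Int) :
    (partition_repeated_entry_array_alt arr).Pairwise
      (fun a b => pvKIdx arr a < pvKIdx arr b ∨ a = b) := by
  unfold partition_repeated_entry_array_alt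
  have hp := PySem.List.sorted_pairwise arr (fun x => (pvFirstDict arr).getD x 0)
  refine hp.imp_of_mem ?_
  intro a b ha hb hab
  rw [PySem.List.mem_sorted] at ha hb
  rw [firstDict_getD arr a ha, firstDict_getD arr b hb] at hab
  unfold pvKIdx at hab
  by_cases heq : arr.idxOf a = arr.idxOf b
  · exact Or.inr (idxOf_inj_mem arr a b ha hb heq)
  · left
    unfold pvKIdx
    have hn : arr.idxOf a ≤ arr.idxOf b := by exact_mod_cast hab
    exact_mod_cast lt_of_le_of_ne hn heq

theorem alt_eq_groups (arr : List Int) :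
    partition_repeated_entry_array_alt arr = pvGroups arr := by
  have hperm : (partition_repeated_entry_array_alt arr).Perm (pvGroups arr) :=
    (PySem.List.sorted_perm arr _ false).trans (groups_perm arr).symm
  refine List.Perm.eq_of_pairwise ?_ (alt_sorted arr) (groups_sorted arr) hperm
  intro a b _ _ hab hba
  rcases hab with h1 | h1
  · rcases hba with h2 | h2
    · exact absurd h1 (not_lt.mpr h2.le)
    · exact h2.symm
  · exact h1

-- ===== VERDICT (by name: the statement is the Claim_ definition above) =====
theorem partition_repeated_entry_array_spec : Claim_equal_partition_repeated_entry_array := by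
  intro arr _
  unfold Spec_partition_repeated_entry_array
  rw [a_eq_groups, alt_eq_groups]
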